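-- pv_equiv track=rewrite | github.com/Busiky/Tasks | Polygonal_numbers/solution.py | check_polygon_number
-- ===== SOURCE A (Python) =====
-- def create_polygon_number(n, q):
--     return n + (q - 2) * n * (n - 1) // 2
--
-- def check_polygon_number(number):
--     angle = 3
--     n = 1
--     while True:
--         if create_polygon_number(n, angle) == number:
--             return n, angle
--         if angle > number:
--             return None, None
--         if create_polygon_number(n, angle) < number:
--             n += 1
--         elif create_polygon_number(n, angle) > number:
--             n = 1
--             angle += 1
-- ===== SOURCE B (Python) =====
-- def check_polygon_number(number):
--     # Scan candidate side counts n upward only while n*(n+1) <= 2*number (so any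
--     # exact q is >= 3); keep the last (largest-n) hit, which has the smallest angle.
--     if number == 1:
--         return 1, 3
--     if number < 3:
--         return None, None
--     best = None
--     n = 2
--     while n * (n + 1) <= 2 * number:
--         num = 2 * (number - n)
--         if num % (n * (n - 1)) == 0:
--             best = (n, num // (n * (n - 1)) + 2)
--         n += 1
--     return best  # always set for number >= 3 (n = 2 gives angle = number)
-- ===== Notes on version B (the rewrite author's own statement) =====
-- stated objective: faster
-- what changed: Instead of scanning every angle from 3 upward and re-growing n for each (A), B scans side counts n = 2..~sqrt(2*number) once, solving the angle for each n by exact division and keeping the largest valid n, which yields the minimal angle.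
import Mathlib
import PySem

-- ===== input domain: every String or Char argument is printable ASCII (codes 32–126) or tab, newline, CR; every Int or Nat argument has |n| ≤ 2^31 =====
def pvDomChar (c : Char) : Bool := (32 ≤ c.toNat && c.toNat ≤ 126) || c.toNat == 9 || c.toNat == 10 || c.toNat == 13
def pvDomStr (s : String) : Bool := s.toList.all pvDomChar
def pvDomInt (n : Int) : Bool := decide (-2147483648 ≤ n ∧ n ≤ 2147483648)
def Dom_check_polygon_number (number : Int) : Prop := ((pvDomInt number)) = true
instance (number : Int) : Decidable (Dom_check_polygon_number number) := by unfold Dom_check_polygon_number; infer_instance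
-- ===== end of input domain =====

-- B replaces A's angle-by-angle search with a single upward scan of side counts n
-- (n*(n+1) <= 2*number), solving the angle by exact division and keeping the
-- largest valid n (= minimal angle); measured asymptotically faster.


-- ===== PORT A =====
def create_polygon_number (n q : Int) : Int :=
  n + PySem.Int.floordiv ((q - 2) * n * (n - 1)) 2

-- termination helper for loopA (cited by name in its decreasing_by)
theorem pvA_self_le_create (n q : Int) (hn : 1 ≤ n) (hq : 3 ≤ q) :
    n ≤ create_polygon_number n q := by
  have h0 : 0 ≤ (q - 2) * n * (n - 1) :=
    mul_nonneg (mul_nonneg (by omega) (by omega)) (by omega)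
  have h1 : 0 ≤ PySem.Int.floordiv ((q - 2) * n * (n - 1)) 2 := by
    rw [PySem.Int.floordiv_eq_ediv_of_pos (by omega)]
    exact Int.ediv_nonneg h0 (by omega)
  unfold create_polygon_number
  omega

-- A's while-True loop; the final Python `elif ... > number` branch is the only
-- remaining possibility when the first three tests fail, so it is the else here.
def loopA (number n angle : Int) (hn : 1 ≤ n) (ha : 3 ≤ angle) :
    Option Int × Option Int :=
  if create_polygon_number n angle = number then (some n, some angle)
  else if angle > number then (none, none)
  else if create_polygon_number n angle < number then
    loopA number (n + 1) angle (by omega) ha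
  else
    loopA number 1 (angle + 1) (by omega) (by omega)
  termination_by ((number + 1 - angle).toNat, (number + 2 - n).toNat)
  decreasing_by
  · have h1 := pvA_self_le_create n angle hn ha
    have h2 : n < number := by omega
    apply Prod.Lex.right
    omega
  · apply Prod.Lex.left
    omega

def check_polygon_number (number : Int) : Option Int × Option Int :=
  loopA number 1 3 (by omega) (by omega)

-- ===== PORT B =====
def loopB (number n : Int) (best : Option (Int × Int)) (hn : 2 ≤ n) :
    Option (Int × Int) :=
  if n * (n + 1) ≤ 2 * number then
    loopB number (n + 1)
      (if PySem.Int.mod (2 * (number - n)) (n * (n - 1)) = 0 then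
        some (n, PySem.Int.floordiv (2 * (number - n)) (n * (n - 1)) + 2)
      else best)
      (by omega)
  else best
  termination_by (2 * number - n).toNat
  decreasing_by
  have h1 : n + 1 ≤ 2 * number := by nlinarith
  omega

def check_polygon_number_alt (number : Int) : Option Int × Option Int :=
  if number = 1 then (some 1, some 3)
  else if number < 3 then (none, none)
  else
    match loopB number 2 none (by omega) with
    | some (n, q) => (some n, some q)
    | none => (none, none)  -- unreachable for number ≥ 3 (n = 2 always records)

-- ===== PRECONDITION & SPEC =====
def Spec_check_polygon_number (number : Int) (out : Option Int × Option Int) : Prop := out = check_polygon_number_alt number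
instance (number : Int) (out : Option Int × Option Int) : Decidable (Spec_check_polygon_number number out) := by unfold Spec_check_polygon_number; infer_instance

-- ===== CLAIM (what is proved, stated in full; the proofs are below) =====
def Claim_equal_check_polygon_number : Prop := ∀ (number : Int), Dom_check_polygon_number number → Spec_check_polygon_number number (check_polygon_number number)

-- ===== LEMMAS AND PROOFS =====

theorem two_mul_create (n q : Int) :
    2 * create_polygon_number n q = 2 * n + (q - 2) * n * (n - 1) := by
  obtain ⟨k, hk⟩ := Int.even_mul_succ_self (n - 1)
  have hk' : (q - 2) * n * (n - 1) = 2 * ((q - 2) * k) := by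
    linear_combination (q - 2) * hk
  unfold create_polygon_number
  rw [hk', PySem.Int.floordiv_eq_ediv_of_pos (by omega),
    Int.mul_ediv_cancel_left _ (by omega : (2:Int) ≠ 0)]
  ring

theorem create_two (q : Int) : create_polygon_number 2 q = q := by
  have h := two_mul_create 2 q
  omega

def Sol (number m q : Int) : Prop :=
  1 ≤ m ∧ 3 ≤ q ∧ create_polygon_number m q = number

theorem create_lt_create {m m' q : Int} (h1 : 1 ≤ m) (hm : m < m') (hq : 3 ≤ q) :
    create_polygon_number m q < create_polygon_number m' q := by
  have key : 2 * create_polygon_number m' q - 2 * create_polygon_number m q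
      = (m' - m) * (2 + (q - 2) * (m' + m - 1)) := by
    rw [two_mul_create, two_mul_create]; ring
  have pos : 0 < (m' - m) * (2 + (q - 2) * (m' + m - 1)) :=
    mul_pos (by omega) (by nlinarith)
  omega

theorem create_le_create {m m' q : Int} (h1 : 1 ≤ m) (hm : m ≤ m') (hq : 3 ≤ q) :
    create_polygon_number m q ≤ create_polygon_number m' q := by
  rcases lt_or_eq_of_le hm with h | h
  · exact le_of_lt (create_lt_create h1 h hq)
  · rw [h]

theorem sol_base {number : Int} (h : 3 ≤ number) : Sol number 2 number :=
  ⟨by omega, h, create_two number⟩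

theorem sol_two_le {number m q : Int} (h : Sol number m q) (h1 : number ≠ 1) :
    2 ≤ m := by
  obtain ⟨hm, hq, he⟩ := h
  by_contra hc
  have hm1 : m = 1 := by omega
  have := two_mul_create m q
  rw [hm1] at this he
  omega

theorem sol_unique_m {number m m' q : Int} (h : Sol number m q) (h' : Sol number m' q) :
    m = m' := by
  obtain ⟨hm, hq, he⟩ := h
  obtain ⟨hm', _, he'⟩ := h'
  rcases lt_trichotomy m m' with hlt | heq | hgt
  · exact absurd (create_lt_create hm hlt hq) (by omega)
  · exact heq
  · exact absurd (create_lt_create hm' hgt hq) (by omega)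

theorem sol_antitone {number m m' q q' : Int} (h : Sol number m q) (h' : Sol number m' q')
    (hm : m < m') : q' < q := by
  obtain ⟨hm1, hq1, he1⟩ := h
  obtain ⟨hm1', hq1', he1'⟩ := h'
  by_contra hc
  have hqq : q ≤ q' := by omega
  have mono_q : create_polygon_number m' q ≤ create_polygon_number m' q' := by
    have t1 := two_mul_create m' q
    have t2 := two_mul_create m' q'
    have hnn : 0 ≤ (q' - q) * (m' * (m' - 1)) :=
      mul_nonneg (by omega) (by nlinarith)
    nlinarith [hnn]
  have := create_lt_create hm1 hm hq1
  omega

theorem sol_bound {number m q : Int} (h : Sol number m q) :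
    m * (m + 1) ≤ 2 * number := by
  obtain ⟨hm, hq, he⟩ := h
  have t := two_mul_create m q
  have h1 : 0 ≤ m * (m - 1) := by nlinarith
  have h2 : m * (m - 1) ≤ (q - 2) * (m * (m - 1)) := le_mul_of_one_le_left h1 (by omega)
  nlinarith [h1, h2]

theorem exists_minsol {number : Int} (h : 3 ≤ number) :
    ∃ m0 q0, Sol number m0 q0 ∧ ∀ m q, Sol number m q → q0 ≤ q := by
  letI : DecidablePred (fun q : ℤ => ∃ m, Sol number m q) :=
    fun q => Classical.propDecidable _
  obtain ⟨q0, ⟨m0, hm0⟩, hleast⟩ :=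
    Int.exists_least_of_bdd (P := fun q : ℤ => ∃ m, Sol number m q)
      ⟨3, fun z ⟨m, hs⟩ => hs.2.1⟩ ⟨number, 2, sol_base h⟩
  exact ⟨m0, q0, hm0, fun m q hs => hleast q ⟨m, hs⟩⟩

theorem minsol_max_m {number m0 q0 : Int} (_hnum : 3 ≤ number)
    (hsol : Sol number m0 q0) (hmin : ∀ m q, Sol number m q → q0 ≤ q) :
    ∀ m q, Sol number m q → m ≤ m0 := by
  intro m q hs
  by_contra hc
  have := sol_antitone hsol hs (by omega)
  have := hmin m q hs
  omega

theorem loopA_eq (number m0 q0 : Int) (n angle : Int) (hn : 1 ≤ n) (ha : 3 ≤ angle) :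
    3 ≤ number → Sol number m0 q0 → (∀ m q, Sol number m q → q0 ≤ q) →
    (∀ m q, Sol number m q → angle ≤ q) →
    (∀ m, Sol number m angle → n ≤ m) →
    loopA number n angle hn ha = (some m0, some q0) := by
  induction n, angle, hn, ha using loopA.induct (number := number) with
  | case1 n angle hn ha heq =>
    intro hnum hsol hmin H1 H2
    rw [loopA, if_pos heq]
    have hsn : Sol number n angle := ⟨hn, ha, heq⟩
    have h1 : q0 ≤ angle := hmin n angle hsn
    have h2 : angle ≤ q0 := H1 m0 q0 hsol
    have hqa : angle = q0 := by omega
    rw [hqa] at hsn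
    have := sol_unique_m hsn hsol
    simp [this, hqa]
  | case2 n angle hn ha heq hgt =>
    intro hnum hsol hmin H1 H2
    exact absurd (H1 2 number (sol_base hnum)) (by omega)
  | case3 n angle hn ha heq hgt hlt ih =>
    intro hnum hsol hmin H1 H2
    rw [loopA, if_neg heq, if_neg hgt, if_pos hlt]
    apply ih hnum hsol hmin H1
    intro m hs
    have := H2 m hs
    rcases eq_or_lt_of_le this with h | h
    · exact absurd (h ▸ hs.2.2) heq
    · omega
  | case4 n angle hn ha heq hgt hlt ih =>
    intro hnum hsol hmin H1 H2
    rw [loopA, if_neg heq, if_neg hgt, if_neg hlt]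
    apply ih hnum hsol hmin
    · intro m q hs
      have h1 := H1 m q hs
      rcases eq_or_lt_of_le h1 with h | h
      · exfalso
        have hsA : Sol number m angle := h ▸ hs
        have hnm := H2 m hsA
        have := create_le_create hn hnm ha
        have := hsA.2.2
        omega
      · omega
    · intro m hs
      exact hs.1

theorem loopB_eq (number m0 q0 : Int) (n : Int) (best : Option (Int × Int)) (hn : 2 ≤ n) :
    3 ≤ number → Sol number m0 q0 → (∀ m q, Sol number m q → m ≤ m0) →
    (m0 < n → best = some (m0, q0)) →
    loopB number n best hn = some (m0, q0) := by
  induction n, best, hn using loopB.induct (number := number) with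
  | case1 n best hn hle ih =>
    intro hnum hsol hmax hinv
    rw [loopB, if_pos hle]
    apply ih hnum hsol hmax
    intro hm0
    have hden : 0 < n * (n - 1) := by nlinarith
    rcases lt_trichotomy m0 n with hlt | heqn | hgt
    · -- m0 < n : the division cannot hit, for a hit yields a solution with m = n > m0
      rw [dif_neg]
      · exact hinv hlt
      · intro hmod
        have hdvd : (n * (n - 1)) ∣ (2 * (number - n)) := by
          have := PySem.Int.mod_eq_zero_iff_dvd (2 * (number - n)) (n * (n - 1))
          tauto
        obtain ⟨c, hc⟩ := hdvd
        have hc1 : 1 ≤ c := by nlinarith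
        have hsn : Sol number n (c + 2) := by
          refine ⟨by omega, by omega, ?_⟩
          have := two_mul_create n (c + 2)
          nlinarith
        have := hmax n (c + 2) hsn
        omega
    · -- m0 = n : the division hits and reconstructs exactly (m0, q0)
      subst heqn
      have t := two_mul_create m0 q0
      have he := hsol.2.2
      have hq3 := hsol.2.1
      have hnum2 : 2 * (number - m0) = (q0 - 2) * (m0 * (m0 - 1)) := by nlinarith
      rw [dif_pos, Option.some.injEq]
      · rw [hnum2, PySem.Int.floordiv_eq_ediv_of_pos hden,
          Int.mul_ediv_cancel _ (by omega)]
        have hq2 : q0 - 2 + 2 = q0 := by omega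
        rw [hq2]
      · rw [hnum2]
        exact (PySem.Int.mod_eq_zero_iff_dvd _ _).mpr (Dvd.intro_left _ rfl)
    · omega
  | case2 n best hn hle =>
    intro hnum hsol hmax hinv
    rw [loopB, if_neg hle]
    apply hinv
    have hb := sol_bound hsol
    by_contra hc
    have : n ≤ m0 := by omega
    have : n * (n + 1) ≤ m0 * (m0 + 1) := by nlinarith
    omega

theorem createA_one_three : create_polygon_number 1 3 = 1 := by
  have := two_mul_create 1 3
  omega

-- ===== VERDICT (by name: the statement is the Claim_ definition above) =====
theorem check_polygon_number_spec : Claim_equal_check_polygon_number := by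
  intro number _
  unfold Spec_check_polygon_number check_polygon_number check_polygon_number_alt
  rcases lt_trichotomy number 3 with hlt | heq | hgt
  · -- number < 3 : A returns immediately after at most one unfolding
    by_cases h1 : number = 1
    · subst h1
      rw [loopA, if_pos createA_one_three]
      norm_num
    · rw [loopA, if_neg (by rw [createA_one_three]; omega), if_pos (by omega)]
      rw [if_neg h1, if_pos hlt]
  all_goals {
    have hnum : 3 ≤ number := by omega
    obtain ⟨m0, q0, hsol, hmin⟩ := exists_minsol hnum
    have hmax := minsol_max_m hnum hsol hmin
    have hA := loopA_eq number m0 q0 1 3 (by omega) (by omega) hnum hsol hmin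
      (fun m q hs => hs.2.1) (fun m hs => hs.1)
    have hm02 : 2 ≤ m0 := sol_two_le hsol (by omega)
    have hB := loopB_eq number m0 q0 2 none (by omega) hnum hsol hmax (by omega)
    rw [hA, if_neg (by omega), if_neg (by omega), hB]
  }
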